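-- pv_equiv track=rewrite | github.com/fabricenativel/cpge-info | pc/Evaluations/DS/DS1/rando.py | deniv
-- ===== SOURCE A (Python) =====
-- def deniv(coords):
--     dpositif, dnegatif = 0, 0
--     for i in range(1, len(coords)):
--         alt = coords[i][2]
--         prec = coords[i-1][2]
--         if alt > prec:
--             dpositif += (alt-prec)
--         else:
--             dnegatif += (alt-prec)
--     return dpositif, dnegatif
-- ===== SOURCE B (Python) =====
-- def deniv(coords):
--     if len(coords) < 2:
--         return (0, 0)
--     total = coords[-1][2] - coords[0][2]
--     dpositif = sum(b[2] - a[2] for a, b in zip(coords, coords[1:]) if b[2] > a[2])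
--     return (dpositif, total - dpositif)
-- ===== Notes on version B (the rewrite author's own statement) =====
-- stated objective: alternative
-- what changed: B accumulates only the positive consecutive differences over zipped pairs and derives the negative total from the telescoping identity (last altitude minus first equals the sum of all differences), instead of A's index loop accumulating two counters in if/else branches.
import Mathlib
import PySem

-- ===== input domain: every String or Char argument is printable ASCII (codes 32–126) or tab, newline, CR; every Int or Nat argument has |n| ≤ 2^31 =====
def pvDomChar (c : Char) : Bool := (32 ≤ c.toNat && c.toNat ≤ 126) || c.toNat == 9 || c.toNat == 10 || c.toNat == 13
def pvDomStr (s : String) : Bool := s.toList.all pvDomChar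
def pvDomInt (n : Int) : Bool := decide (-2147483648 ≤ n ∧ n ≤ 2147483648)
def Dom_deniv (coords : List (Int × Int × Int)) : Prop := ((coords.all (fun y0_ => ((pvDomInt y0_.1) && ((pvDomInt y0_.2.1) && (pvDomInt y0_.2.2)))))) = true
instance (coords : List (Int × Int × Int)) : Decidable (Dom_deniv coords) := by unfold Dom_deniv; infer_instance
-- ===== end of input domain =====

-- B replaces A's two-counter if/else index loop by summing positive consecutive
-- differences over zipped pairs and deriving the negative part by telescoping
-- (alternative decomposition; same cost).


-- ===== PORT A =====
def deniv (coords : List (Int × Int × Int)) : Int × Int :=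
  (PySem.List.pyRange 1 (coords.length : Int) 1).foldl
    (fun (s : Int × Int) i =>
      let alt : Int := (PySem.List.pyGetD coords i (0, 0, 0)).2.2
      let prec : Int := (PySem.List.pyGetD coords (i - 1) (0, 0, 0)).2.2
      if alt > prec then (s.1 + (alt - prec), s.2) else (s.1, s.2 + (alt - prec)))
    (0, 0)

-- ===== PORT B =====
def deniv_alt (coords : List (Int × Int × Int)) : Int × Int :=
  if coords.length < 2 then (0, 0)
  else
    let total : Int :=
      (PySem.List.pyGetD coords (-1) (0, 0, 0)).2.2 - (PySem.List.pyGetD coords 0 (0, 0, 0)).2.2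
    let dpositif : Int :=
      (((coords.zip (coords.drop 1)).filter (fun p => p.2.2.2 > p.1.2.2)).map
        (fun p => p.2.2.2 - p.1.2.2)).sum
    (dpositif, total - dpositif)

-- ===== PRECONDITION & SPEC =====
def Spec_deniv (coords : List (Int × Int × Int)) (out : Int × Int) : Prop := out = deniv_alt coords
instance (coords : List (Int × Int × Int)) (out : Int × Int) : Decidable (Spec_deniv coords out) := by unfold Spec_deniv; infer_instance

-- ===== CLAIM (what is proved, stated in full; the proofs are below) =====
def Claim_equal_deniv : Prop := ∀ (coords : List (Int × Int × Int)), Dom_deniv coords → Spec_deniv coords (deniv coords)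

-- ===== LEMMAS AND PROOFS =====

-- the step on one consecutive pair, as A's loop body performs it
def pvStep (s : Int × Int) (p : (Int × Int × Int) × (Int × Int × Int)) : Int × Int :=
  if p.2.2.2 > p.1.2.2 then (s.1 + (p.2.2.2 - p.1.2.2), s.2) else (s.1, s.2 + (p.2.2.2 - p.1.2.2))

-- A's index loop is the pair fold over the suffix starting at i-1
lemma pv_loop_eq_zip (coords : List (Int × Int × Int)) :
    ∀ (k i : ℕ) (s : Int × Int), 1 ≤ i → coords.length - i = k →
    (PySem.List.pyRange (i : Int) (coords.length : Int) 1).foldl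
      (fun (s : Int × Int) j =>
        let alt : Int := (PySem.List.pyGetD coords j (0, 0, 0)).2.2
        let prec : Int := (PySem.List.pyGetD coords (j - 1) (0, 0, 0)).2.2
        if alt > prec then (s.1 + (alt - prec), s.2) else (s.1, s.2 + (alt - prec))) s
    = ((coords.drop (i - 1)).zip (coords.drop i)).foldl pvStep s := by
  intro k
  induction k with
  | zero =>
    intro i s hi hk
    have hle : coords.length ≤ i := by omega
    rw [PySem.List.pyRange_one_eq_nil (by exact_mod_cast hle)]
    rw [List.drop_eq_nil_of_le hle]
    simp
  | succ k ih =>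
    intro i s hi hk
    have hlt : i < coords.length := by omega
    rw [PySem.List.pyRange_one_cons (by exact_mod_cast hlt)]
    have h1 : (i : Int) + 1 = ((i + 1 : ℕ) : Int) := by push_cast; ring
    have hgi : PySem.List.pyGetD coords (i : Int) (0, 0, 0) = coords[i] := by
      rw [PySem.List.pyGetD_natCast]; exact List.getD_eq_getElem coords _ hlt
    have hi1 : i - 1 < coords.length := by omega
    have hgi1 : PySem.List.pyGetD coords ((i : Int) - 1) (0, 0, 0) = coords[i-1] := by
      have hc : (i : Int) - 1 = ((i - 1 : ℕ) : Int) := by omega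
      rw [hc, PySem.List.pyGetD_natCast]; exact List.getD_eq_getElem coords _ hi1
    have hd1 : coords.drop (i - 1) = coords[i-1] :: coords.drop i := by
      have hc1 : i - 1 + 1 = i := by omega
      rw [List.drop_eq_getElem_cons hi1, hc1]
    have hd2 : coords.drop i = coords[i] :: coords.drop (i + 1) := List.drop_eq_getElem_cons hlt
    rw [List.foldl_cons, hgi, hgi1, h1, ih (i + 1) _ (by omega) (by omega)]
    have hd0 : i + 1 - 1 = i := by omega
    rw [hd0, hd1, hd2]
    simp only [List.zip_cons_cons, List.foldl_cons]
    rfl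

-- first component of the pair fold = sum of the positive differences
lemma pv_fst (l : List ((Int × Int × Int) × (Int × Int × Int))) :
    ∀ s : Int × Int, (l.foldl pvStep s).1
      = s.1 + ((l.filter (fun p => p.2.2.2 > p.1.2.2)).map (fun p => p.2.2.2 - p.1.2.2)).sum := by
  induction l with
  | nil => intro s; simp
  | cons p l ih =>
    intro s
    simp only [List.foldl_cons, List.filter_cons]
    by_cases h : p.2.2.2 > p.1.2.2 <;> simp [pvStep, h, ih] <;> ring

-- the two components together sum all differences
lemma pv_sum (l : List ((Int × Int × Int) × (Int × Int × Int))) :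
    ∀ s : Int × Int, (l.foldl pvStep s).1 + (l.foldl pvStep s).2
      = s.1 + s.2 + (l.map (fun p => p.2.2.2 - p.1.2.2)).sum := by
  induction l with
  | nil => intro s; simp
  | cons p l ih =>
    intro s
    simp only [List.foldl_cons, List.map_cons, List.sum_cons]
    by_cases h : p.2.2.2 > p.1.2.2 <;> simp [pvStep, h, ih] <;> ring

-- telescoping: the differences along consecutive pairs sum to last minus first
lemma pv_tele : ∀ (rest : List (Int × Int × Int)) (x : Int × Int × Int),
    (((x :: rest).zip rest).map (fun p => p.2.2.2 - p.1.2.2)).sum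
      = ((x :: rest).getLast?.getD x).2.2 - x.2.2 := by
  intro rest
  induction rest with
  | nil => intro x; simp
  | cons y r ih =>
    intro x
    have hy : (y :: r).getLast? = some ((y :: r).getLast (by simp)) :=
      List.getLast?_eq_some_getLast (by simp)
    have h := ih y
    simp only [List.zip_cons_cons, List.map_cons, List.sum_cons, List.getLast?_cons_cons, hy,
      Option.getD_some] at h ⊢
    linarith

-- ===== VERDICT (by name: the statement is the Claim_ definition above) =====
theorem deniv_spec : Claim_equal_deniv := by
  intro coords _
  unfold Spec_deniv deniv deniv_alt
  match coords with
  | [] => decide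
  | [x] => simp [PySem.List.pyRange_one_eq_nil]
  | x :: y :: r =>
    have hlen : ¬ (x :: y :: r).length < 2 := by simp
    rw [if_neg hlen]
    have hz := pv_loop_eq_zip (x :: y :: r) ((x :: y :: r).length - 1) 1 (0, 0) (le_refl 1) rfl
    simp only [Nat.cast_one] at hz
    rw [hz]
    simp only [Nat.sub_self, List.drop_zero]
    set l := ((x :: y :: r).zip ((x :: y :: r).drop 1)) with hl
    have h1 := pv_fst l (0, 0)
    have h2 := pv_sum l (0, 0)
    have htele : (l.map (fun p => p.2.2.2 - p.1.2.2)).sum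
        = ((x :: y :: r).getLast?.getD x).2.2 - x.2.2 := by
      rw [hl]; simpa using pv_tele (y :: r) x
    have hneg : PySem.List.pyGetD (x :: y :: r) (-1) (0,0,0)
        = (x :: y :: r).getLast (by simp) := PySem.List.pyGetD_neg_one _ _ (by simp)
    have hgl : ((x :: y :: r).getLast (by simp)) = ((x :: y :: r).getLast?.getD x) := by
      rw [List.getLast?_eq_some_getLast (by simp), Option.getD_some]
    have h0 : PySem.List.pyGetD (x :: y :: r) 0 (0,0,0) = x :=
      PySem.List.pyGetD_zero_cons _ _ _
    refine Prod.ext ?_ ?_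
    · simpa using h1
    · simp only [hneg, hgl, h0]
      simp only [htele] at h2
      simp only [h1] at h2
      simp only [hl] at h1 h2 ⊢
      linarith
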